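-- pv_equiv track=rewrite | github.com/fatikani/project-st | utilities/enhanced_reporter.py | categorize_bugs
-- ===== SOURCE A (Python) =====
-- def categorize_bugs(bugs):
--     """Categorize bugs using taxonomy"""
--     categorized = {
--         'Functional': [],
--         'Performance': [],
--         'Security': [],
--         'UI/UX': [],
--         'Compatibility': [],
--         'Accessibility': []
--     }
--
--     for bug in bugs:
--         bug_type = bug.get('type', '').lower()
--
--         if 'javascript' in bug_type or 'function' in bug_type:
--             categorized['Functional'].append(bug)
--         elif 'performance' in bug_type or 'load' in bug_type:
--             categorized['Performance'].append(bug)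
--         elif 'security' in bug_type or 'auth' in bug_type:
--             categorized['Security'].append(bug)
--         elif 'ui' in bug_type or 'layout' in bug_type or 'display' in bug_type:
--             categorized['UI/UX'].append(bug)
--         elif 'browser' in bug_type or 'compatibility' in bug_type:
--             categorized['Compatibility'].append(bug)
--         elif 'accessibility' in bug_type or 'alt' in bug_type or 'label' in bug_type:
--             categorized['Accessibility'].append(bug)
--         else:
--             categorized['Functional'].append(bug)  # Default category
--
--     return categorized
-- ===== SOURCE B (Python) =====
-- _RULES = [
--     (('javascript', 'function'), 'Functional'),
--     (('performance', 'load'), 'Performance'),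
--     (('security', 'auth'), 'Security'),
--     (('ui', 'layout', 'display'), 'UI/UX'),
--     (('browser', 'compatibility'), 'Compatibility'),
--     (('accessibility', 'alt', 'label'), 'Accessibility'),
-- ]
--
-- _CATS = ['Functional', 'Performance', 'Security', 'UI/UX', 'Compatibility', 'Accessibility']
--
--
-- def _category(bug):
--     bug_type = bug.get('type', '').lower()
--     for keywords, name in _RULES:
--         if any(k in bug_type for k in keywords):
--             return name
--     return 'Functional'
--
--
-- def categorize_bugs(bugs):
--     """Categorize bugs using taxonomy"""
--     return {c: [b for b in bugs if _category(b) == c] for c in _CATS}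
-- ===== Notes on version B (the rewrite author's own statement) =====
-- stated objective: idiomatic
-- what changed: Replaces the single-pass if-elif/append loop over a mutable dict with a pure per-bug classifier driven by an ordered keyword-rule table plus a dict comprehension that filters the bug list once per category.
import Mathlib
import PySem

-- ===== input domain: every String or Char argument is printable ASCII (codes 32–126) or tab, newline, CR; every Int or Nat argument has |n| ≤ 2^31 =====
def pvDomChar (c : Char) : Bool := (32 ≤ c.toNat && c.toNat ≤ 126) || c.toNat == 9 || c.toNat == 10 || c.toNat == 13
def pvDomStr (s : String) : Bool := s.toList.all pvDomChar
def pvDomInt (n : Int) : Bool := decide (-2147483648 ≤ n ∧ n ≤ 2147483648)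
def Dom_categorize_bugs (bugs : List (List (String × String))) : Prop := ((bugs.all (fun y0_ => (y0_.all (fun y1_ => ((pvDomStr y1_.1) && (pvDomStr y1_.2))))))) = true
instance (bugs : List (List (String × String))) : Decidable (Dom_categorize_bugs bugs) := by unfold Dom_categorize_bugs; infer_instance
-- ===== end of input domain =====

-- B replaces A's if-elif/append loop with a keyword-rule-table classifier plus per-category filters (idiomatic decomposition; same cost).



-- ===== PORT A =====
-- literal transliteration of A: fold over bugs, if-elif chain appending into a mutable dict
def pvBugType (bug : List (String × String)) : String :=
  PySem.Str.lower ((PySem.Dict.mk bug).getD "type" "")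

def pvStepA (d : PySem.Dict String (List (List (String × String)))) (bug : List (String × String)) :
    PySem.Dict String (List (List (String × String))) :=
  let t := pvBugType bug
  if PySem.Str.isIn "javascript" t || PySem.Str.isIn "function" t then
    d.modify "Functional" [] (· ++ [bug])
  else if PySem.Str.isIn "performance" t || PySem.Str.isIn "load" t then
    d.modify "Performance" [] (· ++ [bug])
  else if PySem.Str.isIn "security" t || PySem.Str.isIn "auth" t then
    d.modify "Security" [] (· ++ [bug])
  else if PySem.Str.isIn "ui" t || PySem.Str.isIn "layout" t || PySem.Str.isIn "display" t then
    d.modify "UI/UX" [] (· ++ [bug])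
  else if PySem.Str.isIn "browser" t || PySem.Str.isIn "compatibility" t then
    d.modify "Compatibility" [] (· ++ [bug])
  else if PySem.Str.isIn "accessibility" t || PySem.Str.isIn "alt" t || PySem.Str.isIn "label" t then
    d.modify "Accessibility" [] (· ++ [bug])
  else
    d.modify "Functional" [] (· ++ [bug])

def categorize_bugs (bugs : List (List (String × String))) : List (String × List (List (String × String))) :=
  (bugs.foldl pvStepA
    (PySem.Dict.mk [("Functional", []), ("Performance", []), ("Security", []),
                    ("UI/UX", []), ("Compatibility", []), ("Accessibility", [])])).items


-- ===== PORT B =====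
-- transliteration of B: ordered keyword-rule table, a pure classifier, and a comprehension filtering per category
def pvRules : List (List String × String) :=
  [ (["javascript", "function"], "Functional"),
    (["performance", "load"], "Performance"),
    (["security", "auth"], "Security"),
    (["ui", "layout", "display"], "UI/UX"),
    (["browser", "compatibility"], "Compatibility"),
    (["accessibility", "alt", "label"], "Accessibility") ]

def pvCats : List String :=
  ["Functional", "Performance", "Security", "UI/UX", "Compatibility", "Accessibility"]

def pvCategory (bug : List (String × String)) : String :=
  let t := PySem.Str.lower ((PySem.Dict.mk bug).getD "type" "")
  match pvRules.find? (fun r => r.1.any (fun k => PySem.Str.isIn k t)) with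
  | some r => r.2
  | none => "Functional"

def categorize_bugs_alt (bugs : List (List (String × String))) : List (String × List (List (String × String))) :=
  pvCats.map (fun c => (c, bugs.filter (fun b => pvCategory b == c)))

-- ===== PRECONDITION & SPEC =====
def Spec_categorize_bugs (bugs : List (List (String × String))) (out : List (String × List (List (String × String)))) : Prop := out = categorize_bugs_alt bugs
instance (bugs : List (List (String × String))) (out : List (String × List (List (String × String)))) : Decidable (Spec_categorize_bugs bugs out) := by unfold Spec_categorize_bugs; infer_instance

-- ===== CLAIM (what is proved, stated in full; the proofs are below) =====
def Claim_equal_categorize_bugs : Prop := ∀ (bugs : List (List (String × String))), Dom_categorize_bugs bugs → Spec_categorize_bugs bugs (categorize_bugs bugs)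

-- ===== LEMMAS AND PROOFS =====

-- step of A appends the bug to the list of its classifier's category
theorem pvStepA_eq_modify (d : PySem.Dict String (List (List (String × String))))
    (bug : List (String × String)) :
    pvStepA d bug = d.modify (pvCategory bug) [] (· ++ [bug]) := by
  unfold pvStepA pvCategory pvRules pvBugType
  simp only [List.find?, List.any, Bool.or_false]
  split_ifs with h1 h2 h3 h4 h5 h6 <;> simp_all only [Bool.not_eq_true, Bool.or_assoc]

-- modify on the literal six-key dict, one lemma per key (definitional)
theorem pvMod1 (v1 v2 v3 v4 v5 v6 : List (List (String × String))) (b : List (String × String)) :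
    (PySem.Dict.mk [("Functional", v1), ("Performance", v2), ("Security", v3), ("UI/UX", v4),
      ("Compatibility", v5), ("Accessibility", v6)]).modify "Functional" [] (· ++ [b]) =
    PySem.Dict.mk [("Functional", v1 ++ [b]), ("Performance", v2), ("Security", v3), ("UI/UX", v4),
      ("Compatibility", v5), ("Accessibility", v6)] := rfl
theorem pvMod2 (v1 v2 v3 v4 v5 v6 : List (List (String × String))) (b : List (String × String)) :
    (PySem.Dict.mk [("Functional", v1), ("Performance", v2), ("Security", v3), ("UI/UX", v4),
      ("Compatibility", v5), ("Accessibility", v6)]).modify "Performance" [] (· ++ [b]) =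
    PySem.Dict.mk [("Functional", v1), ("Performance", v2 ++ [b]), ("Security", v3), ("UI/UX", v4),
      ("Compatibility", v5), ("Accessibility", v6)] := rfl
theorem pvMod3 (v1 v2 v3 v4 v5 v6 : List (List (String × String))) (b : List (String × String)) :
    (PySem.Dict.mk [("Functional", v1), ("Performance", v2), ("Security", v3), ("UI/UX", v4),
      ("Compatibility", v5), ("Accessibility", v6)]).modify "Security" [] (· ++ [b]) =
    PySem.Dict.mk [("Functional", v1), ("Performance", v2), ("Security", v3 ++ [b]), ("UI/UX", v4),
      ("Compatibility", v5), ("Accessibility", v6)] := rfl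
theorem pvMod4 (v1 v2 v3 v4 v5 v6 : List (List (String × String))) (b : List (String × String)) :
    (PySem.Dict.mk [("Functional", v1), ("Performance", v2), ("Security", v3), ("UI/UX", v4),
      ("Compatibility", v5), ("Accessibility", v6)]).modify "UI/UX" [] (· ++ [b]) =
    PySem.Dict.mk [("Functional", v1), ("Performance", v2), ("Security", v3), ("UI/UX", v4 ++ [b]),
      ("Compatibility", v5), ("Accessibility", v6)] := rfl
theorem pvMod5 (v1 v2 v3 v4 v5 v6 : List (List (String × String))) (b : List (String × String)) :
    (PySem.Dict.mk [("Functional", v1), ("Performance", v2), ("Security", v3), ("UI/UX", v4),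
      ("Compatibility", v5), ("Accessibility", v6)]).modify "Compatibility" [] (· ++ [b]) =
    PySem.Dict.mk [("Functional", v1), ("Performance", v2), ("Security", v3), ("UI/UX", v4),
      ("Compatibility", v5 ++ [b]), ("Accessibility", v6)] := rfl
theorem pvMod6 (v1 v2 v3 v4 v5 v6 : List (List (String × String))) (b : List (String × String)) :
    (PySem.Dict.mk [("Functional", v1), ("Performance", v2), ("Security", v3), ("UI/UX", v4),
      ("Compatibility", v5), ("Accessibility", v6)]).modify "Accessibility" [] (· ++ [b]) =
    PySem.Dict.mk [("Functional", v1), ("Performance", v2), ("Security", v3), ("UI/UX", v4),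
      ("Compatibility", v5), ("Accessibility", v6 ++ [b])] := rfl

-- every bug classifies into one of the six fixed categories
theorem pvCategory_mem (b : List (String × String)) : pvCategory b ∈ pvCats := by
  unfold pvCategory pvCats
  rcases h : pvRules.find? (fun r => r.1.any (fun k =>
      PySem.Str.isIn k (PySem.Str.lower ((PySem.Dict.mk b).getD "type" "")))) with _ | r
  · simp only [h]
    simp
  · have hm := List.mem_of_find?_eq_some h
    unfold pvRules at hm
    simp only [h]
    fin_cases hm <;> simp

theorem pvFoldA_items (bugs : List (List (String × String)))
    (v1 v2 v3 v4 v5 v6 : List (List (String × String))) :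
    (bugs.foldl pvStepA
      (PySem.Dict.mk [("Functional", v1), ("Performance", v2), ("Security", v3),
                      ("UI/UX", v4), ("Compatibility", v5), ("Accessibility", v6)])).items =
    [("Functional", v1 ++ bugs.filter (fun b => pvCategory b == "Functional")),
     ("Performance", v2 ++ bugs.filter (fun b => pvCategory b == "Performance")),
     ("Security", v3 ++ bugs.filter (fun b => pvCategory b == "Security")),
     ("UI/UX", v4 ++ bugs.filter (fun b => pvCategory b == "UI/UX")),
     ("Compatibility", v5 ++ bugs.filter (fun b => pvCategory b == "Compatibility")),
     ("Accessibility", v6 ++ bugs.filter (fun b => pvCategory b == "Accessibility"))] := by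
  induction bugs generalizing v1 v2 v3 v4 v5 v6 with
  | nil => simp
  | cons b bs ih =>
    rw [List.foldl_cons, pvStepA_eq_modify]
    have hmem := pvCategory_mem b
    unfold pvCats at hmem
    simp only [List.mem_cons, List.not_mem_nil, or_false] at hmem
    rcases hmem with h | h | h | h | h | h <;>
      rw [h] <;>
      [rw [pvMod1]; rw [pvMod2]; rw [pvMod3]; rw [pvMod4]; rw [pvMod5]; rw [pvMod6]] <;>
      rw [ih] <;>
      simp [h]

theorem categorize_bugs_spec : Claim_equal_categorize_bugs := by
  intro bugs _
  unfold Spec_categorize_bugs categorize_bugs categorize_bugs_alt pvCats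
  rw [pvFoldA_items]
  simp [List.map]
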